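-- pv_equiv track=rewrite | github.com/KyWins/quantumBloch_ | backend/app/domain/services.py | _analyze_runs
-- ===== SOURCE A (Python) =====
-- def _analyze_runs(sequence: list[str]) -> tuple[int, str, int]:
--     if not sequence:
--         return 0, "", 0
--     longest_len = 1
--     longest_value = sequence[0]
--     current_len = 1
--     switches = 0
--     for prev, current in zip(sequence, sequence[1:]):
--         if current == prev:
--             current_len += 1
--         else:
--             switches += 1
--             if current_len > longest_len:
--                 longest_len = current_len
--                 longest_value = prev
--             current_len = 1
--     if current_len > longest_len:
--         longest_len = current_len
--         longest_value = sequence[-1]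
--     return longest_len, longest_value, switches
-- ===== SOURCE B (Python) =====
-- from itertools import groupby
--
--
-- def _analyze_runs(sequence: list[str]) -> tuple[int, str, int]:
--     if not sequence:
--         return 0, "", 0
--     runs = [(value, len(list(group))) for value, group in groupby(sequence)]
--     best_value, best_len = max(runs, key=lambda run: run[1])
--     return best_len, best_value, len(runs) - 1
-- ===== Notes on version B (the rewrite author's own statement) =====
-- stated objective: idiomatic
-- what changed: Replaces the manual zip-adjacent loop with run-state bookkeeping by a groupby pass into (value, length) runs, taking max by length (first maximal, matching A's strict tie-break) and switches = number of runs - 1.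
import Mathlib
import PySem

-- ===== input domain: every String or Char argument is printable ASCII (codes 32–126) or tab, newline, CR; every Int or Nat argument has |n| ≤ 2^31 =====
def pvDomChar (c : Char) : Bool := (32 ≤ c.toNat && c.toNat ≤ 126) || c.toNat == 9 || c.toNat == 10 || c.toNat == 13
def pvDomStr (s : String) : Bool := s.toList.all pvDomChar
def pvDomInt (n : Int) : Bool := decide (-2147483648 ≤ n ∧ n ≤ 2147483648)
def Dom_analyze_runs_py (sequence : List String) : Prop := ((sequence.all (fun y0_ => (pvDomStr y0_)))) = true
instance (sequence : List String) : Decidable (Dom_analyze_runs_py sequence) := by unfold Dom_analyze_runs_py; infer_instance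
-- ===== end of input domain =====

-- B replaces A's manual adjacent-pair loop by a run-length-encoding pass (groupby) with
-- max-by-length (first maximal) and switches = #runs - 1; idiomatic, same cost.


-- ===== PORT A =====
-- A's loop body over zip(sequence, sequence[1:]) with state (longest_len, longest_value, current_len, switches)
def aStep (st : Int × String × Int × Int) (pc : String × String) : Int × String × Int × Int :=
  let (ll, lv, cl, sw) := st
  let (prev, cur) := pc
  if cur = prev then (ll, lv, cl + 1, sw)
  else if cl > ll then (cl, prev, 1, sw + 1)
  else (ll, lv, 1, sw + 1)

def analyze_runs_py (sequence : List String) : Int × String × Int :=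
  match sequence with
  | [] => (0, "", 0)
  | x :: xs =>
    let st := (List.zip (x :: xs) xs).foldl aStep (1, x, 1, 0)
    let (ll, lv, cl, sw) := st
    if cl > ll then (cl, (x :: xs).getLast (by simp), sw) else (ll, lv, sw)

-- ===== PORT B =====
-- groupby: run-length encoding into (value, length) pairs
def runsAux (v : String) (n : Int) : List String → List (String × Int)
  | [] => [(v, n)]
  | y :: ys => if y = v then runsAux v (n + 1) ys else (v, n) :: runsAux y 1 ys

-- max(runs, key=lambda r: r[1]): keep the first run, replace only on strictly greater length
def bestRun (b : String × Int) (rs : List (String × Int)) : String × Int :=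
  rs.foldl (fun b q => if q.2 > b.2 then q else b) b

def analyze_runs_py_alt (sequence : List String) : Int × String × Int :=
  match sequence with
  | [] => (0, "", 0)
  | x :: xs =>
    match runsAux x 1 xs with
    | [] => (0, "", 0)  -- unreachable: runsAux always returns a nonempty list
    | r :: rs =>
      let best := bestRun r rs
      (best.2, best.1, ((r :: rs).length : Int) - 1)

-- ===== PRECONDITION & SPEC =====
def Spec_analyze_runs_py (sequence : List String) (out : Int × String × Int) : Prop := out = analyze_runs_py_alt sequence
instance (sequence : List String) (out : Int × String × Int) : Decidable (Spec_analyze_runs_py sequence out) := by unfold Spec_analyze_runs_py; infer_instance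

-- ===== CLAIM (what is proved, stated in full; the proofs are below) =====
def Claim_equal_analyze_runs_py : Prop := ∀ (sequence : List String), Dom_analyze_runs_py sequence → Spec_analyze_runs_py sequence (analyze_runs_py sequence)

-- ===== LEMMAS AND PROOFS =====

-- A's final step, as a function of the loop state (prev = last element of the sequence)
def aFinish (prev : String) (st : Int × String × Int × Int) : Int × String × Int :=
  let (ll, lv, cl, sw) := st
  if cl > ll then (cl, prev, sw) else (ll, lv, sw)

-- fold in longest-run order (length first), mirroring aStep's run-completion update
def gStep (b : Int × String) (r : String × Int) : Int × String :=
  if r.2 > b.1 then (r.2, r.1) else b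

theorem getLast_cons_ne_nil {x y : String} {t : List String} (h : y :: t ≠ []) :
    (x :: y :: t).getLast (by simp) = (y :: t).getLast h := by
  simp [List.getLast]

-- Main invariant: A's loop continued from state (ll, lv, cl, sw) with prev the last
-- consumed element equals folding gStep over the runs still to be completed.
theorem loop_runs (xs : List String) :
    ∀ (prev : String) (ll : Int) (lv : String) (cl sw : Int),
      aFinish ((prev :: xs).getLast (by simp))
          ((List.zip (prev :: xs) xs).foldl aStep (ll, lv, cl, sw))
        = (let runs := runsAux prev cl xs
           let b := runs.foldl gStep (ll, lv)
           (b.1, b.2, sw + (runs.length : Int) - 1)) := by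
  induction xs with
  | nil =>
    intro prev ll lv cl sw
    simp [runsAux, aFinish, gStep, List.getLast]
    split <;> simp
  | cons y t ih =>
    intro prev ll lv cl sw
    have hzip : List.zip (prev :: y :: t) (y :: t) = (prev, y) :: List.zip (y :: t) t := by
      simp [List.zip]
    rw [getLast_cons_ne_nil (by simp), hzip]
    by_cases hy : y = prev
    · subst hy
      simp only [List.foldl_cons, aStep, if_true]
      rw [ih y ll lv (cl + 1) sw]
      simp [runsAux]
    · simp only [List.foldl_cons, aStep, if_neg hy]
      by_cases hcl : cl > ll
      · rw [if_pos hcl, ih y cl prev 1 (sw + 1)]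
        simp only [runsAux, if_neg hy]
        simp [gStep, if_pos hcl]
        ring_nf
      · rw [if_neg hcl, ih y ll lv 1 (sw + 1)]
        simp only [runsAux, if_neg hy]
        simp [gStep, if_neg hcl]
        ring_nf

-- runsAux always returns a nonempty list whose first run carries v and a length ≥ n
theorem runsAux_head (xs : List String) :
    ∀ (v : String) (n : Int), ∃ m rest, n ≤ m ∧ runsAux v n xs = (v, m) :: rest := by
  induction xs with
  | nil => intro v n; exact ⟨n, [], le_refl n, rfl⟩
  | cons y t ih =>
    intro v n
    by_cases hy : y = v
    · obtain ⟨m, rest, hm, heq⟩ := ih v (n + 1)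
      exact ⟨m, rest, by omega, by simp [runsAux, if_pos hy, heq]⟩
    · exact ⟨n, runsAux y 1 t, le_refl n, by simp [runsAux, if_neg hy]⟩

-- gStep over rs from (b.2, b.1) is the swap of B's max-by-length fold from b
theorem gStep_swap (rs : List (String × Int)) :
    ∀ (b : String × Int),
      rs.foldl gStep (b.2, b.1) = ((bestRun b rs).2, (bestRun b rs).1) := by
  induction rs with
  | nil => intro b; simp [bestRun]
  | cons q t ih =>
    intro b
    simp only [bestRun, List.foldl_cons] at *
    rw [show gStep (b.2, b.1) q = ((if q.2 > b.2 then q else b).2, (if q.2 > b.2 then q else b).1) by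
      simp [gStep]; split <;> simp]
    exact ih _

-- ===== VERDICT (by name: the statement is the Claim_ definition above) =====
theorem analyze_runs_py_spec : Claim_equal_analyze_runs_py := by
  intro sequence _
  unfold Spec_analyze_runs_py
  match sequence with
  | [] => rfl
  | x :: xs =>
    have h := loop_runs xs x 1 x 1 0
    obtain ⟨m, rest, hm, heq⟩ := runsAux_head xs x 1
    have hA : analyze_runs_py (x :: xs)
        = aFinish ((x :: xs).getLast (by simp))
            ((List.zip (x :: xs) xs).foldl aStep (1, x, 1, 0)) := by
      simp only [analyze_runs_py, aFinish]
    rw [hA, h, heq]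
    simp only [analyze_runs_py_alt, heq]
    have hfirst : gStep (1, x) (x, m) = (m, x) := by
      simp [gStep]; omega
    simp only [List.foldl_cons, hfirst]
    rw [show ((m : Int), x) = (((x, m) : String × Int).2, ((x, m) : String × Int).1) from rfl,
        gStep_swap rest (x, m)]
    simp [bestRun]
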